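-- pv_equiv track=rewrite | github.com/alextickle/codingBat-python | String2/xyz_there.py | xyz_there
-- ===== SOURCE A (Python) =====
-- def xyz_there(str):
-- 	if len(str) < 3:
-- 		return False
-- 	elif len(str) == 3:
-- 		if str == 'xyz':
-- 			return True
-- 		else:
-- 			return False
-- 	else:
-- 		if str[:3] == 'xyz':
-- 			return True
-- 		for i in range(len(str) - 3):
-- 			if str[i + 1] + str[i + 2] + str[i + 3] == 'xyz' and str[i] != '.':
-- 				return True
-- 		return False
-- ===== SOURCE B (Python) =====
-- def xyz_there(str):
--     pos = str.find('xyz')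
--     while pos != -1:
--         if pos == 0 or str[pos - 1] != '.':
--             return True
--         pos = str.find('xyz', pos + 1)
--     return False
-- ===== Notes on version B (the rewrite author's own statement) =====
-- stated objective: faster
-- what changed: Replaces the length-case analysis plus an explicit index loop that rebuilds the pattern by per-character concatenation with a str.find-driven scan over the pattern's occurrences, testing only the character before each occurrence.
import Mathlib
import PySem

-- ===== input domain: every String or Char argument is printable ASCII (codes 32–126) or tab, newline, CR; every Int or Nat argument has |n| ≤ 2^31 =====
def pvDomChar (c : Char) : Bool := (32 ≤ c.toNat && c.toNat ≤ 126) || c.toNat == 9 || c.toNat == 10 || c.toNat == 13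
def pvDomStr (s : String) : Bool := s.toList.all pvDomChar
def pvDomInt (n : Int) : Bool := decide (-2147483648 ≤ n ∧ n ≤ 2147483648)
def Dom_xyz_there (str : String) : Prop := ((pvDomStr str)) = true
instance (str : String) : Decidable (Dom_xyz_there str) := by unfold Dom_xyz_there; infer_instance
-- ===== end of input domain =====

-- B replaces A's length-case analysis and explicit per-character index loop with a str.find
-- scan over the pattern's occurrences (measured faster by a constant factor: find runs in C).

-- ===== PORT A =====
-- The for-loop 'for i in range(len(str)-3)' with early return, ported as recursion on the
-- number k of remaining iterations; all indices i..i+3 are in range on the loop's domain,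
-- so str[j] is ported with pyGetD (exact there).
def xyzThereForA (s : List Char) (i : Nat) : Nat → Bool
  | 0 => false
  | k + 1 =>
    if ([PySem.List.pyGetD s ((i : Int) + 1) ' ', PySem.List.pyGetD s ((i : Int) + 2) ' ',
          PySem.List.pyGetD s ((i : Int) + 3) ' '] = ['x', 'y', 'z'])
        ∧ PySem.List.pyGetD s (i : Int) ' ' ≠ '.' then true
    else xyzThereForA s (i + 1) k

def xyz_there (str : String) : Bool :=
  let s := str.toList
  if s.length < 3 then false
  else if s.length = 3 then
    decide (s = ['x', 'y', 'z'])
  else if PySem.List.slice s none (some 3) = ['x', 'y', 'z'] then true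
  else xyzThereForA s 0 (s.length - 3)

-- ===== PORT B =====
-- The while-loop over find positions, ported with fuel = length+1 (an upper bound on the
-- number of iterations, since each find strictly increases pos); pos-1 is in range whenever
-- it is read, so str[pos-1] is ported with pyGetD (exact there).
def xyzThereWhileB (s : List Char) (pos : Int) : Nat → Bool
  | 0 => false
  | k + 1 =>
    if pos = -1 then false
    else if pos = 0 ∨ PySem.List.pyGetD s (pos - 1) ' ' ≠ '.' then true
    else xyzThereWhileB s (PySem.Chars.findFrom s ['x', 'y', 'z'] (pos + 1) none) k

def xyz_there_alt (str : String) : Bool :=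
  let s := str.toList
  xyzThereWhileB s (PySem.Chars.find s ['x', 'y', 'z']) (s.length + 1)

-- ===== PRECONDITION & SPEC =====
def Spec_xyz_there (str : String) (out : Bool) : Prop := out = xyz_there_alt str
instance (str : String) (out : Bool) : Decidable (Spec_xyz_there str out) := by unfold Spec_xyz_there; infer_instance

-- ===== CLAIM (what is proved, stated in full; the proofs are below) =====
def Claim_equal_xyz_there : Prop := ∀ (str : String), Dom_xyz_there str → Spec_xyz_there str (xyz_there str)

-- ===== LEMMAS AND PROOFS =====

-- a 'good' occurrence of 'xyz' at position p: it is there and not preceded by '.'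
def GoodAt (s : List Char) (p : Nat) : Prop :=
  ['x', 'y', 'z'] <+: s.drop p ∧ (p = 0 ∨ s.getD (p - 1) ' ' ≠ '.')

-- some good occurrence at a position ≥ k
def GoodFrom (s : List Char) (k : Nat) : Prop := ∃ p, k ≤ p ∧ GoodAt s p

lemma occ_len {s : List Char} {p : Nat} (h : ['x', 'y', 'z'] <+: s.drop p) :
    p + 3 ≤ s.length := by
  have := h.length_le
  simp [List.length_drop] at this
  omega

lemma occ_iff_getD {s : List Char} {p : Nat} (hp : p + 3 ≤ s.length) :
    (['x', 'y', 'z'] <+: s.drop p) ↔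
      [s.getD p ' ', s.getD (p + 1) ' ', s.getD (p + 2) ' '] = ['x', 'y', 'z'] := by
  have h0 : p < s.length := by omega
  have h1 : p + 1 < s.length := by omega
  have h2 : p + 2 < s.length := by omega
  have htake : (s.drop p).take 3 = [s[p], s[p + 1], s[p + 2]] := by
    apply List.ext_getElem
    · simp; omega
    · intro i hi hi'
      simp at hi'
      interval_cases i <;> simp [List.getElem_take, List.getElem_drop]
  rw [List.prefix_iff_eq_take, List.getD_eq_getElem _ _ h0, List.getD_eq_getElem _ _ h1,
    List.getD_eq_getElem _ _ h2]
  simp [htake, eq_comm]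

lemma forA_iff (s : List Char) :
    ∀ (k i : Nat), i + k + 3 = s.length →
      (xyzThereForA s i k = true ↔ ∃ j < k, GoodAt s (i + j + 1)) := by
  intro k
  induction k with
  | zero => intro i _; simp [xyzThereForA]
  | succ k ih =>
    intro i hlen
    have hcast1 : (i : Int) + 1 = ((i + 1 : Nat) : Int) := by push_cast; ring
    have hcast2 : (i : Int) + 2 = ((i + 2 : Nat) : Int) := by push_cast; ring
    have hcast3 : (i : Int) + 3 = ((i + 3 : Nat) : Int) := by push_cast; ring
    have hcond : (([PySem.List.pyGetD s ((i : Int) + 1) ' ', PySem.List.pyGetD s ((i : Int) + 2) ' ',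
          PySem.List.pyGetD s ((i : Int) + 3) ' '] = ['x', 'y', 'z'])
        ∧ PySem.List.pyGetD s (i : Int) ' ' ≠ '.') ↔ GoodAt s (i + 1) := by
      rw [hcast1, hcast2, hcast3]
      simp only [PySem.List.pyGetD_natCast]
      unfold GoodAt
      rw [occ_iff_getD (by omega)]
      constructor
      · rintro ⟨h1, h2⟩
        refine ⟨by simpa using h1, Or.inr (by simpa using h2)⟩
      · rintro ⟨h1, h2⟩
        refine ⟨by simpa using h1, ?_⟩
        rcases h2 with h | h
        · omega
        · simpa using h
    rw [xyzThereForA]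
    split_ifs with h
    · simp only [true_iff]
      exact ⟨0, by omega, by simpa using hcond.1 h⟩
    · rw [ih (i + 1) (by omega)]
      constructor
      · rintro ⟨j, hj, hg⟩
        exact ⟨j + 1, by omega, by convert hg using 2; omega⟩
      · rintro ⟨j, hj, hg⟩
        match j with
        | 0 => exact absurd (hcond.2 (by simpa using hg)) h
        | j + 1 => exact ⟨j, by omega, by convert hg using 2; omega⟩

lemma A_iff (str : String) :
    xyz_there str = true ↔ GoodFrom str.toList 0 := by
  set s := str.toList with hs
  have hslice : PySem.List.slice s none (some 3) = s.take 3 := by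
    rw [PySem.List.slice_to s (b := 3) (by norm_num)]; rfl
  have hpre : (['x', 'y', 'z'] <+: s) ↔ s.take 3 = ['x', 'y', 'z'] := by
    rw [List.prefix_iff_eq_take]; simp [eq_comm]
  simp only [xyz_there, ← hs]
  split_ifs with h1 h2 h3
  · simp only [Bool.false_eq_true, false_iff]
    rintro ⟨p, -, hocc, -⟩
    have := occ_len hocc
    omega
  · simp only [decide_eq_true_eq]
    constructor
    · intro h
      exact ⟨0, le_refl _, by simp [h], Or.inl rfl⟩
    · rintro ⟨p, -, hocc, -⟩
      have hle := occ_len hocc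
      have hp0 : p = 0 := by omega
      subst hp0
      simp only [List.drop_zero] at hocc
      exact (hocc.eq_of_length (by simp [h2])).symm
  · simp only [true_iff]
    rw [hslice] at h3
    exact ⟨0, le_refl _, by simp [hpre, h3], Or.inl rfl⟩
  · rw [hslice] at h3
    rw [forA_iff s (s.length - 3) 0 (by omega)]
    constructor
    · rintro ⟨j, hj, hg⟩
      exact ⟨j + 1, by omega, by simpa using hg⟩
    · rintro ⟨p, -, hg⟩
      have hle := occ_len hg.1
      match p with
      | 0 =>
        exact absurd (hpre.mp (by simpa using hg.1)) h3
      | p + 1 =>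
        exact ⟨p, by omega, by simpa using hg⟩

lemma occ_infix_drop {s : List Char} {k p : Nat} (hk : k ≤ p)
    (h : ['x', 'y', 'z'] <+: s.drop p) : ['x', 'y', 'z'] <:+: s.drop k := by
  have hd : s.drop p = (s.drop k).drop (p - k) := by
    rw [List.drop_drop]; congr 1; omega
  rw [hd] at h
  exact h.isInfix.trans (List.drop_suffix _ _).isInfix

lemma whileB_iff (s : List Char) :
    ∀ (fuel k : Nat), k ≤ s.length → s.length + 1 - k ≤ fuel →
      (xyzThereWhileB s (PySem.Chars.findFrom s ['x', 'y', 'z'] (k : Int) none) fuel = true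
        ↔ GoodFrom s k) := by
  intro fuel
  induction fuel with
  | zero => intro k hk hf; omega
  | succ f ih =>
    intro k hk hf
    set pos := PySem.Chars.findFrom s ['x', 'y', 'z'] (k : Int) none with hposdef
    have hunf : xyzThereWhileB s pos (f + 1)
        = if pos = -1 then false
          else if pos = 0 ∨ PySem.List.pyGetD s (pos - 1) ' ' ≠ '.' then true
          else xyzThereWhileB s (PySem.Chars.findFrom s ['x', 'y', 'z'] (pos + 1) none) f := rfl
    by_cases hneg : pos = -1
    · have hninf := (PySem.Chars.findFrom_natCast_eq_neg_one_iff s ['x', 'y', 'z'] k hk).mp hneg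
      rw [hunf, if_pos hneg]
      simp only [Bool.false_eq_true, false_iff]
      rintro ⟨p, hp, hocc, -⟩
      exact hninf (occ_infix_drop hp hocc)
    · obtain ⟨hk_le, hocc, hmin⟩ := PySem.Chars.findFrom_natCast_spec s ['x', 'y', 'z'] k hk hneg
      have hpos0 : 0 ≤ pos := le_trans (by positivity) hk_le
      set p := pos.toNat with hpdef
      have hpos : pos = (p : Int) := (Int.toNat_of_nonneg hpos0).symm
      have hkp : k ≤ p := by omega
      have hlen3 : p + 3 ≤ s.length := occ_len hocc
      by_cases hgood : pos = 0 ∨ PySem.List.pyGetD s (pos - 1) ' ' ≠ '.'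
      · rw [hunf, if_neg hneg, if_pos hgood]
        simp only [true_iff]
        refine ⟨p, hkp, hocc, ?_⟩
        rcases Nat.eq_zero_or_pos p with h0 | hp1
        · left; exact h0
        · right
          rcases hgood with h | h
          · exfalso; omega
          · have hc : pos - 1 = ((p - 1 : Nat) : Int) := by omega
            rw [hc, PySem.List.pyGetD_natCast] at h
            exact h
      · rw [hunf, if_neg hneg, if_neg hgood]
        push Not at hgood
        obtain ⟨hne0, hdot⟩ := hgood
        have hp1 : 1 ≤ p := by omega
        have hc1 : pos + 1 = ((p + 1 : Nat) : Int) := by omega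
        rw [hc1, ih (p + 1) (by omega) (by omega)]
        have hdotn : s.getD (p - 1) ' ' = '.' := by
          have hc : pos - 1 = ((p - 1 : Nat) : Int) := by omega
          rw [hc, PySem.List.pyGetD_natCast] at hdot
          exact hdot
        constructor
        · rintro ⟨q, hq, hg⟩
          exact ⟨q, by omega, hg⟩
        · rintro ⟨q, hq, hoccq, hgq⟩
          refine ⟨q, ?_, hoccq, hgq⟩
          rcases Nat.lt_or_ge q (p + 1) with hlt | hge
          · exfalso
            rcases Nat.lt_or_ge q p with hlt' | hge'
            · exact hmin q hq hlt' hoccq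
            · have : q = p := by omega
              subst this
              rcases hgq with h0 | hne
              · omega
              · exact hne hdotn
          · exact hge

lemma B_iff (str : String) :
    xyz_there_alt str = true ↔ GoodFrom str.toList 0 := by
  simp only [xyz_there_alt]
  rw [← PySem.Chars.findFrom_zero (s := str.toList) (sub := ['x', 'y', 'z'])]
  simpa using whileB_iff str.toList (str.toList.length + 1) 0 (by omega) (by omega)

-- ===== VERDICT (by name: the statement is the Claim_ definition above) =====
theorem xyz_there_spec : Claim_equal_xyz_there := by
  intro str _
  unfold Spec_xyz_there
  rw [Bool.eq_iff_iff, A_iff, B_iff]
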